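-- pv_equiv track=rewrite | github.com/evernym/sdk | cxs/ci/extract_major_minor.py | _strip_version
-- ===== SOURCE A (Python) =====
-- def _truncate(s):
--     if '.' in s:
--         return s[::-1][s.index('.')+1:][::-1]
--     else:
--         return s
--
-- def _strip_version(s):
--     if '=' in s:
--         index = s.index('=')
--         s = s[index+1:].strip(' ').strip('\n').strip('\"')
--         while s.count('.') > 1:
--             s = _truncate(s)
--         return s
--     else:
--         return s
-- ===== SOURCE B (Python) =====
-- def _major_minor(version):
--     dot = version.find('.')
--     if dot != -1:
--         second = version.find('.', dot + 1)
--         if second != -1: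
--             return version[:second]
--     return version
--
-- def _strip_version(s):
--     if '=' in s:
--         return _major_minor(s[s.index('=') + 1:].strip(' ').strip('\n').strip('"'))
--     return s
-- ===== Notes on version B (the rewrite author's own statement) =====
-- stated objective: simpler
-- what changed: B drops the while-loop of reverse/slice/reverse truncations and instead cuts the normalized version text at its second dot (two str.find calls and one slice).
-- intended difference: On inputs containing an equals sign whose normalized tail has at least two dots and where the first-dot position plus one does not divide the distance from the second dot to the end, A's truncation loop (which blindly drops first-dot-index+1 characters from the end each step) misses the second dot and returns a mangled prefix, e.g. 10. (trailing dot, third character gone) on the witness 'v=10.2.3', while B returns the intended major.minor prefix 10.2 there. — e.g. on _strip_version("v=10.2.3"): A returns "10.", B returns "10.2"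
import Mathlib
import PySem

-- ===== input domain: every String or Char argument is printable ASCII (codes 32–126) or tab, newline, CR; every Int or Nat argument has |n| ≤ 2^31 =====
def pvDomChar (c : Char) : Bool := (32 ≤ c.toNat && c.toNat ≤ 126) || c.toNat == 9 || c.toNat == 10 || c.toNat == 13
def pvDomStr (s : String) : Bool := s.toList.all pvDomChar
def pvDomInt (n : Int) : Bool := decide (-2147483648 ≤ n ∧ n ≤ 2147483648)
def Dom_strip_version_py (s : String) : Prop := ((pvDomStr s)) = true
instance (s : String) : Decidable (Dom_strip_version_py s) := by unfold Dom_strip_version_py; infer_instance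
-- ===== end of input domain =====

-- B replaces A's while-loop of reverse/slice/reverse truncations by a single cut at the second
-- dot; on inputs where A's step width (first dot index + 1) misses the second dot, A returns a
-- mangled prefix and B returns the intended major.minor (stated as D_ below). Return value only.

-- ===== PORT A =====
-- _truncate: s[::-1][s.index('.')+1:][::-1] (s[::-1] is reverse, s.index('.') on the ORIGINAL s)
def truncate_py (l : List Char) : List Char :=
  if PySem.Chars.isIn ['.'] l then
    (PySem.List.slice l.reverse (some (PySem.Chars.find l ['.'] + 1)) none).reverse
  else l

-- lemmas the while-loop port cites for termination
theorem pv_singleton_infix_iff (c : Char) (l : List Char) : [c] <:+: l ↔ c ∈ l := by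
  constructor
  · rintro ⟨u, v, rfl⟩; simp
  · intro h
    obtain ⟨u, v, rfl⟩ := List.append_of_mem h
    exact ⟨u, v, by simp⟩

theorem pv_count_go_singleton (c : Char) (l : List Char) (fuel acc : Nat) (h : l.length ≤ fuel) :
    PySem.Chars.count.go [c] fuel l acc = acc + l.count c := by
  induction l generalizing fuel acc with
  | nil => cases fuel <;> simp [PySem.Chars.count.go]
  | cons a t ih =>
    cases fuel with
    | zero => simp at h
    | succ fuel =>
      simp only [List.length_cons, Nat.add_le_add_iff_right] at h
      by_cases hca : c = a
      · subst hca
        simp [PySem.Chars.count.go, List.isPrefixOf, ih _ _ h, List.count_cons_self]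
        omega
      · simp [PySem.Chars.count.go, List.isPrefixOf, hca, ih _ _ h,
          List.count_cons_of_ne (by exact fun hh => hca hh.symm)]

theorem pv_count_singleton (c : Char) (l : List Char) :
    PySem.Chars.count l [c] = l.count c := by
  simpa [PySem.Chars.count] using pv_count_go_singleton c l l.length 0 le_rfl

theorem pv_singleton_prefix_iff (c : Char) (xs : List Char) : [c] <+: xs ↔ xs.head? = some c := by
  cases xs with
  | nil => simp
  | cons a t =>
    constructor
    · rintro ⟨u, hu⟩; simp at hu; simp [hu.1]
    · intro h; simp at h; exact ⟨t, by simp [h]⟩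

theorem pv_idxOf_unique (c : Char) (l : List Char) (j : Nat) (hj : j < l.length) (hc : l[j] = c)
    (hmin : ∀ i, (hi : i < j) → l[i]'(by omega) ≠ c) : l.idxOf c = j := by
  induction l generalizing j with
  | nil => simp at hj
  | cons a t ih =>
    cases j with
    | zero => simp at hc; simp [hc, List.idxOf_cons_self]
    | succ j =>
      have ha : a ≠ c := by have := hmin 0 (by omega); simpa using this
      rw [List.idxOf_cons_ne _ ha]
      rw [ih j (by simpa using hj) (by simpa using hc)
        (fun i hi => by simpa using hmin (i + 1) (by omega))]

theorem pv_find_singleton_of_mem (c : Char) (l : List Char) (h : c ∈ l) :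
    PySem.Chars.find l [c] = (l.idxOf c : Int) := by
  have hnn : 0 ≤ PySem.Chars.find l [c] := by
    rw [PySem.Chars.find_nonneg_iff, pv_singleton_infix_iff]; exact h
  obtain ⟨hpre, hmin⟩ := PySem.Chars.find_spec hnn
  set j := (PySem.Chars.find l [c]).toNat with hjdef
  rw [pv_singleton_prefix_iff, List.head?_drop] at hpre
  have hj : j < l.length := by
    by_contra hge
    simp [List.getElem?_eq_none (show l.length ≤ j by omega)] at hpre
  have hc : l[j] = c := by
    rw [List.getElem?_eq_getElem hj] at hpre; exact Option.some.inj hpre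
  have : l.idxOf c = j := by
    refine pv_idxOf_unique c l j hj hc (fun i hi hvi => ?_)
    exact hmin i hi (by rw [pv_singleton_prefix_iff, List.head?_drop,
      List.getElem?_eq_getElem (by omega), hvi])
  omega

theorem pv_isIn_singleton_of_mem (c : Char) (l : List Char) (h : c ∈ l) :
    PySem.Chars.isIn [c] l = true := by
  rw [PySem.Chars.isIn_iff_infix, pv_singleton_infix_iff]; exact h

theorem pv_truncate_eq_take (l : List Char) (h : '.' ∈ l) :
    truncate_py l = l.take (l.length - (l.idxOf '.' + 1)) := by
  have hi := pv_isIn_singleton_of_mem '.' l h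
  have hf := pv_find_singleton_of_mem '.' l h
  have hidx : l.idxOf '.' < l.length := List.idxOf_lt_length_of_mem h
  unfold truncate_py
  rw [if_pos hi, hf]
  have hcast : (l.idxOf '.' : Int) + 1 = ((l.idxOf '.' + 1 : Nat) : Int) := by push_cast; ring
  rw [hcast, PySem.List.slice_from_natCast]
  rw [List.drop_reverse, List.reverse_reverse]

theorem pv_truncate_length_lt (l : List Char) (h : PySem.Chars.count l ['.'] > 1) :
    (truncate_py l).length < l.length := by
  rw [pv_count_singleton] at h
  have hmem : '.' ∈ l := List.count_pos_iff.mp (by omega)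
  rw [pv_truncate_eq_take l hmem]
  have : 0 < l.length := List.length_pos_of_mem hmem
  simp [List.length_take]
  omega

-- the while-loop of _strip_version
def version_loop_py (l : List Char) : List Char :=
  if h : PySem.Chars.count l ['.'] > 1 then version_loop_py (truncate_py l) else l
termination_by l.length
decreasing_by exact pv_truncate_length_lt l h

-- s[index+1:].strip(' ').strip('\n').strip('"') — the normalization both Pythons share verbatim
def pvTail (s : String) : List Char :=
  PySem.Chars.stripChars (PySem.Chars.stripChars (PySem.Chars.stripChars
    (PySem.List.slice s.toList (some (PySem.Chars.find s.toList ['='] + 1)) none)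
    [' ']) ['\n']) ['"']

def strip_version_py (s : String) : String :=
  if PySem.Chars.isIn ['='] s.toList then String.ofList (version_loop_py (pvTail s))
  else s

-- ===== PORT B =====
def major_minor_alt (version : List Char) : List Char :=
  let dot := PySem.Chars.find version ['.']
  if dot != -1 then
    let second := PySem.Chars.findFrom version ['.'] (dot + 1) none
    if second != -1 then PySem.List.slice version none (some second)
    else version
  else version

def strip_version_py_alt (s : String) : String :=
  if PySem.Chars.isIn ['='] s.toList then String.ofList (major_minor_alt (pvTail s))
  else s

-- ===== PRECONDITION & SPEC =====
-- On inputs with '=' whose normalized tail has ≥ 2 dots and where (first dot index + 1) does not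
-- divide the distance from the second dot to the end, A's fixed-width end-truncation misses the
-- second dot and returns a mangled prefix (e.g. '10.' for 'v=10.2.3'); B returns the intended
-- major.minor prefix up to the second dot ('10.2').
def D_strip_version_py (s : String) : Prop :=
  let t := pvTail s
  let u := t.drop (t.idxOf '.' + 1)
  '=' ∈ s.toList ∧ 1 < t.count '.' ∧ ¬(t.idxOf '.' + 1) ∣ (u.length - u.idxOf '.')
instance (s : String) : Decidable (D_strip_version_py s) := by unfold D_strip_version_py; infer_instance

def Spec_strip_version_py (s : String) (out : String) : Prop :=
  ¬ D_strip_version_py s → out = strip_version_py_alt s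
instance (s : String) (out : String) : Decidable (Spec_strip_version_py s out) := by unfold Spec_strip_version_py; infer_instance

def pvDiffWitness_strip_version_py : String := "v=10.2.3"
def pvDiffWitnessOut_strip_version_py : String × String := ("10.", "10.2")

-- ===== CLAIM =====
def Claim_unchanged_strip_version_py : Prop :=
  ∀ (s : String), Dom_strip_version_py s → Spec_strip_version_py s (strip_version_py s)
def Claim_changed_strip_version_py : Prop :=
  Dom_strip_version_py (pvDiffWitness_strip_version_py) ∧
  D_strip_version_py (pvDiffWitness_strip_version_py) ∧
  strip_version_py (pvDiffWitness_strip_version_py) = pvDiffWitnessOut_strip_version_py.1 ∧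
  strip_version_py_alt (pvDiffWitness_strip_version_py) = pvDiffWitnessOut_strip_version_py.2 ∧
  pvDiffWitnessOut_strip_version_py.1 ≠ pvDiffWitnessOut_strip_version_py.2
def Claim_exact_strip_version_py : Prop :=
  ∀ (s : String), Dom_strip_version_py s → D_strip_version_py s →
    strip_version_py s ≠ strip_version_py_alt s

-- ===== LEMMAS AND PROOFS =====

theorem pv_find_singleton_of_not_mem (c : Char) (l : List Char) (h : c ∉ l) :
    PySem.Chars.find l [c] = -1 := by
  rw [PySem.Chars.find_eq_neg_one_iff, pv_singleton_infix_iff]; exact h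

theorem pv_mem_take_iff (c : Char) (l : List Char) (k : Nat) :
    c ∈ l.take k ↔ c ∈ l ∧ l.idxOf c < k := by
  induction l generalizing k with
  | nil => simp
  | cons a t ih =>
    cases k with
    | zero => simp
    | succ k =>
      by_cases hac : a = c
      · subst hac; simp [List.idxOf_cons_self]
      · simp [List.idxOf_cons_ne, hac, ih, Ne.symm hac]
        try omega

theorem pv_take_idxOf (c : Char) (l : List Char) (k : Nat) (h : l.idxOf c < k) :
    (l.take k).idxOf c = l.idxOf c := by
  induction l generalizing k with
  | nil => simp
  | cons a t ih =>
    cases k with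
    | zero => omega
    | succ k =>
      by_cases hac : a = c
      · subst hac; simp [List.idxOf_cons_self]
      · simp only [List.idxOf_cons_ne _ hac] at h ⊢
        simp only [List.take_succ_cons, List.idxOf_cons_ne _ hac]
        rw [ih k (by omega)]

-- index of the second dot of t (meaningful when t has at least two dots)
def pvD1 (t : List Char) : Nat := t.idxOf '.' + 1 + (t.drop (t.idxOf '.' + 1)).idxOf '.'

-- A's loop stops at this cut length (proof-side closed form of the fixed-width truncation)
def pvCut (t : List Char) : Nat :=
  ((pvD1 t : Int) - ((pvD1 t : Int) - (t.length : Int)) % ((t.idxOf '.' : Int) + 1)).toNat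

def pvClosed (t : List Char) : List Char :=
  if '.' ∈ t ∧ '.' ∈ t.drop (t.idxOf '.' + 1) then t.take (pvCut t) else t

theorem pv_count_take_first (t : List Char) (h : '.' ∈ t) :
    List.count '.' (t.take (t.idxOf '.' + 1)) = 1 := by
  induction t with
  | nil => simp at h
  | cons a t ih =>
    by_cases ha : a = '.'
    · subst ha; simp [List.idxOf_cons_self]
    · have hmem : '.' ∈ t := by
        rcases List.mem_cons.mp h with h' | h'
        · exact absurd h'.symm ha
        · exact h'
      rw [List.idxOf_cons_ne _ ha, List.take_succ_cons]
      simp [ha, ih hmem]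

theorem pv_count_split (t : List Char) (h : '.' ∈ t) :
    List.count '.' t = 1 + List.count '.' (t.drop (t.idxOf '.' + 1)) := by
  conv_lhs => rw [← List.take_append_drop (t.idxOf '.' + 1) t]
  rw [List.count_append, pv_count_take_first t h]

theorem pv_loop_unfold (t : List Char) :
    version_loop_py t = if PySem.Chars.count t ['.'] > 1 then version_loop_py (truncate_py t) else t := by
  rw [version_loop_py]
  split_ifs with h <;> rfl

theorem pv_main : ∀ (n : Nat) (t : List Char), t.length ≤ n → version_loop_py t = pvClosed t := by
  intro n
  induction n with
  | zero =>
    intro t ht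
    have : t = [] := List.eq_nil_of_length_eq_zero (by omega)
    subst this
    rw [pv_loop_unfold]
    simp [pv_count_singleton, pvClosed]
  | succ n ih =>
    intro t ht
    by_cases h1 : '.' ∈ t
    · by_cases h2 : '.' ∈ t.drop (t.idxOf '.' + 1)
      · -- at least two dots: one loop step, then induction
        have hd0 : t.idxOf '.' < t.length := List.idxOf_lt_length_of_mem h1
        have he0 : (t.drop (t.idxOf '.' + 1)).idxOf '.' < t.length - (t.idxOf '.' + 1) := by
          have := List.idxOf_lt_length_of_mem h2
          simpa using this
        have hcnt : PySem.Chars.count t ['.'] > 1 := by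
          rw [pv_count_singleton, pv_count_split t h1]
          have := List.count_pos_iff.mpr h2
          omega
        rw [pv_loop_unfold, if_pos hcnt, pv_truncate_eq_take t h1]
        set k : Nat := t.idxOf '.' + 1 with hk
        set nn : Nat := t.length with hnn
        clear_value k nn
        have h2k : '.' ∈ t.drop (t.idxOf '.' + 1) := by rw [← hk]; exact h2
        have he : (t.drop k).idxOf '.' < nn - k := he0
        have hDnat : pvD1 t = k + (t.drop k).idxOf '.' := by rw [hk]; unfold pvD1; rfl
        have hlen' : (t.take (nn - k)).length = nn - k := by
          rw [List.length_take]; omega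
        rw [ih _ (by omega)]
        rw [show pvClosed t = t.take (pvCut t) from if_pos ⟨h1, h2k⟩]
        by_cases hc : k + (t.drop k).idxOf '.' < nn - k
        · -- both dots survive the truncation
          have h1' : '.' ∈ t.take (nn - k) := (pv_mem_take_iff '.' t (nn - k)).mpr ⟨h1, by omega⟩
          have hidx' : (t.take (nn - k)).idxOf '.' = t.idxOf '.' := pv_take_idxOf '.' t _ (by omega)
          have hdrop' : (t.take (nn - k)).drop k = (t.drop k).take (nn - k - k) := by
            rw [List.drop_take]
          have h2' : '.' ∈ (t.take (nn - k)).drop ((t.take (nn - k)).idxOf '.' + 1) := by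
            rw [hidx', ← hk, hdrop']
            exact (pv_mem_take_iff '.' (t.drop k) (nn - k - k)).mpr ⟨h2, by omega⟩
          rw [show pvClosed (t.take (nn - k)) = (t.take (nn - k)).take (pvCut (t.take (nn - k)))
            from if_pos ⟨h1', h2'⟩]
          have hD1' : pvD1 (t.take (nn - k)) = pvD1 t := by
            unfold pvD1
            rw [hidx', ← hk, hdrop', pv_take_idxOf '.' (t.drop k) _ (by omega), hk]
          have hcut' : pvCut (t.take (nn - k)) = pvCut t := by
            unfold pvCut
            rw [hD1', hidx', hlen']
            have h3 : (pvD1 t : Int) - ((nn - k : Nat) : Int)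
                = ((pvD1 t : Int) - (t.length : Int)) + ((t.idxOf '.' : Int) + 1) := by
              omega
            rw [h3, Int.add_emod_right]
          rw [hcut', List.take_take]
          -- pvCut t ≤ nn - k, so the min is pvCut t
          set K : Int := (t.idxOf '.' : Int) + 1 with hK
          have hKpos : 0 < K := by omega
          set q : Int := ((pvD1 t : Int) - (t.length : Int)) / K with hq
          set r : Int := ((pvD1 t : Int) - (t.length : Int)) % K with hr
          clear_value K q r
          have hqr : K * q + r = (pvD1 t : Int) - (t.length : Int) := by
            rw [hq, hr]; exact Int.mul_ediv_add_emod _ K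
          have hr0 : 0 ≤ r := by rw [hr]; exact Int.emod_nonneg _ (by omega)
          have hrK : r < K := by rw [hr]; exact Int.emod_lt_of_pos _ hKpos
          have hcutI : (pvCut t : Int) = (pvD1 t : Int) - r := by
            unfold pvCut; rw [← hK, ← hr]
            omega
          have hqneg : q ≤ -1 := by
            by_contra hge
            have hq0 : 0 ≤ q := by omega
            have : 0 ≤ K * q := mul_nonneg (by omega) hq0
            have hDN : (pvD1 t : Int) - (t.length : Int) < 0 := by omega
            linarith
          have hKq : K * q ≤ -K := by
            have := mul_le_mul_of_nonneg_left hqneg (le_of_lt hKpos)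
            linarith
          have hfin : (pvCut t : Int) ≤ (nn : Int) - (k : Int) := by
            have h4 : (pvD1 t : Int) - r = (t.length : Int) + K * q := by linear_combination -hqr
            rw [hcutI, h4]
            have h5 : ((nn : Int)) = (t.length : Int) := by omega
            have h6 : ((k : Int)) = K := by omega
            linarith
          congr 1
          omega
        · -- the second dot is cut away: the loop stops after this step
          have hclosed' : pvClosed (t.take (nn - k)) = t.take (nn - k) := by
            by_cases hd0' : t.idxOf '.' < nn - k
            · have hidx' : (t.take (nn - k)).idxOf '.' = t.idxOf '.' := pv_take_idxOf '.' t _ hd0'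
              refine if_neg ?_
              rintro ⟨-, hmem⟩
              rw [hidx', ← hk, List.drop_take] at hmem
              have := (pv_mem_take_iff '.' (t.drop k) (nn - k - k)).mp hmem
              omega
            · refine if_neg ?_
              rintro ⟨hmem, -⟩
              have := (pv_mem_take_iff '.' t (nn - k)).mp hmem
              omega
          rw [hclosed']
          have hmod : ((pvD1 t : Int) - (t.length : Int)) % ((t.idxOf '.' : Int) + 1)
              = (pvD1 t : Int) - (t.length : Int) + ((t.idxOf '.' : Int) + 1) := by
            rw [← Int.add_emod_right]
            exact Int.emod_eq_of_lt (by omega) (by omega)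
          have hcut : pvCut t = nn - k := by
            unfold pvCut
            rw [hmod]
            omega
          rw [hcut]
      · -- exactly one dot: loop stops, pvClosed is the identity
        have hcnt : ¬ PySem.Chars.count t ['.'] > 1 := by
          rw [pv_count_singleton, pv_count_split t h1]
          have : List.count '.' (t.drop (t.idxOf '.' + 1)) = 0 := by
            simpa using List.count_eq_zero.mpr h2
          omega
        rw [pv_loop_unfold, if_neg hcnt, pvClosed, if_neg (by rintro ⟨-, hh⟩; exact h2 hh)]
    · -- no dot at all
      have hcnt : ¬ PySem.Chars.count t ['.'] > 1 := by
        rw [pv_count_singleton]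
        have : List.count '.' t = 0 := List.count_eq_zero.mpr h1
        omega
      rw [pv_loop_unfold, if_neg hcnt, pvClosed, if_neg (by rintro ⟨hh, -⟩; exact h1 hh)]

theorem pv_loop_eq_closed (t : List Char) : version_loop_py t = pvClosed t :=
  pv_main t.length t le_rfl

-- B's helper computes the take-at-second-dot closed form
-- zeta-expanded form of B's helper (the `let`s written out), proved by `rfl`
theorem pv_mm_alt_eq (t : List Char) : major_minor_alt t =
    (if (PySem.Chars.find t ['.'] != -1) = true then
      if (PySem.Chars.findFrom t ['.'] (PySem.Chars.find t ['.'] + 1) none != -1) = true then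
        PySem.List.slice t none (some (PySem.Chars.findFrom t ['.'] (PySem.Chars.find t ['.'] + 1) none))
      else t
    else t) := rfl

theorem pv_mm_alt_no_dot (t : List Char) (h : '.' ∉ t) : major_minor_alt t = t := by
  rw [pv_mm_alt_eq, pv_find_singleton_of_not_mem '.' t h]
  simp

theorem pv_mm_alt_one_dot (t : List Char) (h1 : '.' ∈ t) (h2 : '.' ∉ t.drop (t.idxOf '.' + 1)) :
    major_minor_alt t = t := by
  have hd0 : t.idxOf '.' < t.length := List.idxOf_lt_length_of_mem h1
  rw [pv_mm_alt_eq, pv_find_singleton_of_mem '.' t h1]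
  have hb : ((t.idxOf '.' : Int) != -1) = true := by
    simp only [bne_iff_ne, ne_eq]; omega
  rw [hb]
  have hcast : (t.idxOf '.' : Int) + 1 = ((t.idxOf '.' + 1 : Nat) : Int) := by push_cast; ring
  rw [if_pos rfl, hcast, PySem.Chars.findFrom_natCast t ['.'] (t.idxOf '.' + 1) (by omega),
    pv_find_singleton_of_not_mem '.' _ h2]
  simp

theorem pv_mm_alt_two_dots (t : List Char) (h1 : '.' ∈ t) (h2 : '.' ∈ t.drop (t.idxOf '.' + 1)) :
    major_minor_alt t = t.take (pvD1 t) := by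
  have hd0 : t.idxOf '.' < t.length := List.idxOf_lt_length_of_mem h1
  have he : (t.drop (t.idxOf '.' + 1)).idxOf '.' < t.length - (t.idxOf '.' + 1) := by
    have := List.idxOf_lt_length_of_mem h2
    simpa using this
  rw [pv_mm_alt_eq, pv_find_singleton_of_mem '.' t h1]
  have hb : ((t.idxOf '.' : Int) != -1) = true := by
    simp only [bne_iff_ne, ne_eq]; omega
  rw [hb]
  have hcast : (t.idxOf '.' : Int) + 1 = ((t.idxOf '.' + 1 : Nat) : Int) := by push_cast; ring
  rw [if_pos rfl, hcast, PySem.Chars.findFrom_natCast t ['.'] (t.idxOf '.' + 1) (by omega),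
    pv_find_singleton_of_mem '.' _ h2]
  rw [if_neg (by omega : ¬ (((t.drop (t.idxOf '.' + 1)).idxOf '.' : Int) = -1))]
  have hsec : ((t.idxOf '.' + 1 : Nat) : Int) + ((t.drop (t.idxOf '.' + 1)).idxOf '.' : Int)
      = ((pvD1 t : Int)) := by unfold pvD1; push_cast; ring
  have hbeq : ((((t.idxOf '.' + 1 : Nat) : Int) + ((t.drop (t.idxOf '.' + 1)).idxOf '.' : Int)) != -1) = true := by
    simp only [bne_iff_ne, ne_eq]; omega
  rw [hbeq]
  simp only [if_true]
  rw [hsec, PySem.List.slice_to _ (by unfold pvD1; omega)]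
  simp

-- with ≥ 2 dots, A's cut is below the second dot, with equality iff the divisibility holds
theorem pv_cut_le (t : List Char) (h1 : '.' ∈ t) (h2 : '.' ∈ t.drop (t.idxOf '.' + 1)) :
    pvCut t ≤ pvD1 t ∧
    (pvCut t = pvD1 t ↔ (t.idxOf '.' + 1) ∣ (t.length - pvD1 t)) := by
  have hd0 : t.idxOf '.' < t.length := List.idxOf_lt_length_of_mem h1
  have he : (t.drop (t.idxOf '.' + 1)).idxOf '.' < t.length - (t.idxOf '.' + 1) := by
    have := List.idxOf_lt_length_of_mem h2
    simpa using this
  set K : Int := (t.idxOf '.' : Int) + 1 with hK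
  have hKpos : 0 < K := by omega
  set r : Int := ((pvD1 t : Int) - (t.length : Int)) % K with hr
  have hr0 : 0 ≤ r := by rw [hr]; exact Int.emod_nonneg _ (by omega)
  have hrK : r < K := by rw [hr]; exact Int.emod_lt_of_pos _ hKpos
  have hDk : K ≤ (pvD1 t : Int) := by unfold pvD1; omega
  have hcutI : (pvCut t : Int) = (pvD1 t : Int) - r := by
    unfold pvCut; rw [← hK, ← hr]; omega
  constructor
  · omega
  · constructor
    · intro hEq
      have hrz : r = 0 := by omega
      rw [hr] at hrz
      have hdvd : K ∣ ((pvD1 t : Int) - (t.length : Int)) := Int.dvd_of_emod_eq_zero hrz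
      have hdvd' : K ∣ ((t.length : Int) - (pvD1 t : Int)) := by
        have hn := (dvd_neg (α := ℤ)).mpr hdvd
        rwa [neg_sub] at hn
      have hDlen : pvD1 t ≤ t.length := by unfold pvD1; omega
      have : ((t.idxOf '.' + 1 : Nat) : Int) ∣ ((t.length - pvD1 t : Nat) : Int) := by
        have h5 : ((t.length - pvD1 t : Nat) : Int) = (t.length : Int) - (pvD1 t : Int) := by omega
        rw [h5]
        have h6 : ((t.idxOf '.' + 1 : Nat) : Int) = K := by omega
        rw [h6]; exact hdvd'
      exact_mod_cast this
    · intro hdvd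
      have hdvdI : K ∣ ((pvD1 t : Int) - (t.length : Int)) := by
        have : ((t.idxOf '.' + 1 : Nat) : Int) ∣ ((t.length - pvD1 t : Nat) : Int) := by
          exact_mod_cast hdvd
        have hDlen : pvD1 t ≤ t.length := by unfold pvD1; omega
        have h5 : ((t.length - pvD1 t : Nat) : Int) = (t.length : Int) - (pvD1 t : Int) := by omega
        rw [h5] at this
        have h6 : ((t.idxOf '.' + 1 : Nat) : Int) = K := by omega
        rw [h6] at this
        have hn := (dvd_neg (α := ℤ)).mpr this
        rwa [neg_sub] at hn
      have hrz : r = 0 := by rw [hr]; exact Int.emod_eq_zero_of_dvd hdvdI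
      omega

theorem pv_isIn_eq_mem (s : String) :
    PySem.Chars.isIn ['='] s.toList = true ↔ '=' ∈ s.toList := by
  rw [PySem.Chars.isIn_iff_infix, pv_singleton_infix_iff]

theorem pv_D_iff (s : String) : D_strip_version_py s ↔
    ('=' ∈ s.toList ∧ '.' ∈ pvTail s ∧ '.' ∈ (pvTail s).drop ((pvTail s).idxOf '.' + 1) ∧
     ¬((pvTail s).idxOf '.' + 1) ∣ ((pvTail s).length - pvD1 (pvTail s))) := by
  unfold D_strip_version_py
  set t := pvTail s with ht
  constructor
  · rintro ⟨hmem, hcnt, hdvd⟩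
    have h1 : '.' ∈ t := List.count_pos_iff.mp (by omega)
    have h2 : '.' ∈ t.drop (t.idxOf '.' + 1) := by
      have := pv_count_split t h1
      exact List.count_pos_iff.mp (by omega)
    have hf : t.idxOf '.' < t.length := List.idxOf_lt_length_of_mem h1
    refine ⟨hmem, h1, h2, ?_⟩
    have hlen : (t.drop (t.idxOf '.' + 1)).length = t.length - (t.idxOf '.' + 1) := by simp
    unfold pvD1
    rw [show t.length - (t.idxOf '.' + 1 + (t.drop (t.idxOf '.' + 1)).idxOf '.')
        = (t.drop (t.idxOf '.' + 1)).length - (t.drop (t.idxOf '.' + 1)).idxOf '.' by omega]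
    exact hdvd
  · rintro ⟨hmem, h1, h2, hdvd⟩
    have hf : t.idxOf '.' < t.length := List.idxOf_lt_length_of_mem h1
    have hcnt : 1 < t.count '.' := by
      have := pv_count_split t h1
      have := List.count_pos_iff.mpr h2
      omega
    refine ⟨hmem, hcnt, ?_⟩
    have hlen : (t.drop (t.idxOf '.' + 1)).length = t.length - (t.idxOf '.' + 1) := by simp
    unfold pvD1 at hdvd
    rw [show t.length - (t.idxOf '.' + 1 + (t.drop (t.idxOf '.' + 1)).idxOf '.')
        = (t.drop (t.idxOf '.' + 1)).length - (t.drop (t.idxOf '.' + 1)).idxOf '.' by omega] at hdvd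
    exact hdvd

-- ===== VERDICT =====
set_option maxHeartbeats 2000000 in
theorem strip_version_py_spec : Claim_unchanged_strip_version_py := by
  intro s _ hnd
  unfold strip_version_py strip_version_py_alt
  by_cases h : PySem.Chars.isIn ['='] s.toList = true
  · rw [if_pos h, if_pos h]
    have hmem : '=' ∈ s.toList := (pv_isIn_eq_mem s).mp h
    rw [pv_loop_eq_closed]
    set t := pvTail s with ht
    by_cases h1 : '.' ∈ t
    · by_cases h2 : '.' ∈ t.drop (t.idxOf '.' + 1)
      · have hdvd : (t.idxOf '.' + 1) ∣ (t.length - pvD1 t) := by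
          by_contra hno
          exact hnd ((pv_D_iff s).mpr ⟨hmem, by rw [← ht]; exact h1, by rw [← ht]; exact h2,
            by rw [← ht]; exact hno⟩)
        obtain ⟨-, hiff⟩ := pv_cut_le t h1 h2
        rw [pvClosed, if_pos ⟨h1, h2⟩, pv_mm_alt_two_dots t h1 h2, hiff.mpr hdvd]
      · rw [pvClosed, if_neg (by rintro ⟨-, hh⟩; exact h2 hh), pv_mm_alt_one_dot t h1 h2]
    · rw [pvClosed, if_neg (by rintro ⟨hh, -⟩; exact h1 hh), pv_mm_alt_no_dot t h1]
  · rw [if_neg h, if_neg h]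

set_option maxHeartbeats 2000000 in
theorem strip_version_py_changed : Claim_changed_strip_version_py := by
  unfold Claim_changed_strip_version_py
  refine ⟨by decide, by decide, ?_, by decide, by decide⟩
  show strip_version_py pvDiffWitness_strip_version_py = pvDiffWitnessOut_strip_version_py.1
  unfold strip_version_py
  rw [if_pos (by decide), pv_loop_eq_closed]
  decide

set_option maxHeartbeats 2000000 in
theorem strip_version_py_tight : Claim_exact_strip_version_py := by
  intro s _ hd
  obtain ⟨hmem, h1, h2, hnodvd⟩ := (pv_D_iff s).mp hd
  unfold strip_version_py strip_version_py_alt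
  have h : PySem.Chars.isIn ['='] s.toList = true := (pv_isIn_eq_mem s).mpr hmem
  rw [if_pos h, if_pos h, pv_loop_eq_closed]
  set t := pvTail s with ht
  obtain ⟨hle, hiff⟩ := pv_cut_le t h1 h2
  have hlt : pvCut t < pvD1 t := by
    rcases lt_or_eq_of_le hle with hlt | heq
    · exact hlt
    · exact absurd (hiff.mp heq) hnodvd
  have hD1len : pvD1 t < t.length := by
    have hd0 : t.idxOf '.' < t.length := List.idxOf_lt_length_of_mem h1
    have := List.idxOf_lt_length_of_mem h2
    unfold pvD1
    simp at this
    omega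
  rw [pvClosed, if_pos ⟨h1, h2⟩, pv_mm_alt_two_dots t h1 h2]
  intro hEq
  have hlist : t.take (pvCut t) = t.take (pvD1 t) := by
    have := congrArg String.toList hEq
    simpa using this
  have hlen := congrArg List.length hlist
  simp [List.length_take] at hlen
  omega
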